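-- pv_equiv track=rewrite | github.com/tlcmonkshawn/MODREEDV1.1 | create_master_doc.py | extract_title_from_content
-- ===== SOURCE A (Python) =====
-- def extract_title_from_content(content):
--     """Try to extract a title from the content."""
--     lines = content.split('\n')
--     # Look for title-like lines (usually after URL and separator)
--     for i, line in enumerate(lines):
--         if line.startswith('URL:'):
--             # Title is usually a few lines after URL
--             for j in range(i+1, min(i+15, len(lines))):
--                 if lines[j].strip() and not lines[j].startswith('=') and len(lines[j].strip()) < 200:
--                     potential_title = lines[j].strip()
--                     if potential_title and not potential_title.startswith('Home'):
--                         return potential_title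
--     return None
-- ===== SOURCE B (Python) =====
-- def extract_title_from_content(content):
--     """Try to extract a title from the content."""
--     last_url = None
--     for idx, line in enumerate(content.split('\n')):
--         if last_url is not None and 1 <= idx - last_url <= 14:
--             stripped = line.strip()
--             if stripped and not line.startswith('=') and len(stripped) < 200 and not stripped.startswith('Home'):
--                 return stripped
--         if line.startswith('URL:'):
--             last_url = idx
--     return None
-- ===== Notes on version B (the rewrite author's own statement) =====
-- stated objective: simpler
-- what changed: B replaces A's nested scan (for every URL marker line, re-scan a 14-line window by index) with a single linear pass over the lines that keeps only the index of the most recent URL marker line and returns the first qualifying title line within 14 lines of it.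
import Mathlib
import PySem

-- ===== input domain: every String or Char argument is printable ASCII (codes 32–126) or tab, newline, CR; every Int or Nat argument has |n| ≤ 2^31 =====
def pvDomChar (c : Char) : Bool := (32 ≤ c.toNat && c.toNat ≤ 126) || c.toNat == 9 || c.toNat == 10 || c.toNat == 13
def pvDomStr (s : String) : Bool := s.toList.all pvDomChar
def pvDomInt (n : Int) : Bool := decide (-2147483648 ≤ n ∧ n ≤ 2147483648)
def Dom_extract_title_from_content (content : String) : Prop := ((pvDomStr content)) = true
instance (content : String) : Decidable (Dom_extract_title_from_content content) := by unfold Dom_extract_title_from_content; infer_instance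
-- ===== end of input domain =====

-- B replaces A's nested URL-marker/window scan by a single pass that tracks the index of the
-- most recent URL-marker line (objective: simpler one-pass algorithm, same return value).

-- ===== PORT A =====
-- inner 'for j in range(i+1, min(i+15, len(lines)))' loop of A
def aWindow (L : List String) : List Int → Option String
  | [] => none
  | j :: rest =>
    let lj := PySem.List.pyGetD L j ""
    if PySem.Str.strip lj ≠ "" ∧ PySem.Str.startswith lj "=" ≠ true ∧ PySem.Str.len (PySem.Str.strip lj) < 200 then
      let pt := PySem.Str.strip lj
      if pt ≠ "" ∧ PySem.Str.startswith pt "Home" ≠ true then some pt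
      else aWindow L rest
    else aWindow L rest

-- outer 'for i, line in enumerate(lines)' loop of A
def aOuter (L : List String) : List (Int × String) → Option String
  | [] => none
  | (i, line) :: rest =>
    if PySem.Str.startswith line "URL:" = true then
      match aWindow L (PySem.List.pyRange (i + 1) (min (i + 15) (L.length : Int)) 1) with
      | some t => some t
      | none => aOuter L rest
    else aOuter L rest

def extract_title_from_content (content : String) : Option String :=
  let lines := (PySem.Str.split? content "\n").getD []
  aOuter lines (PySem.List.enumerate lines 0)

-- ===== PORT B =====
-- single pass with the index of the most recent URL-marker line as state
def bScan (lastUrl : Option Int) : List (Int × String) → Option String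
  | [] => none
  | (idx, line) :: rest =>
    if (match lastUrl with | some u => decide (1 ≤ idx - u ∧ idx - u ≤ 14) | none => false)
        && decide (PySem.Str.strip line ≠ "" ∧ PySem.Str.startswith line "=" ≠ true ∧
                   PySem.Str.len (PySem.Str.strip line) < 200 ∧
                   PySem.Str.startswith (PySem.Str.strip line) "Home" ≠ true) then
      some (PySem.Str.strip line)
    else
      bScan (if PySem.Str.startswith line "URL:" = true then some idx else lastUrl) rest

def extract_title_from_content_alt (content : String) : Option String :=
  let lines := (PySem.Str.split? content "\n").getD []
  bScan none (PySem.List.enumerate lines 0)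

-- ===== PRECONDITION & SPEC =====
def Spec_extract_title_from_content (content : String) (out : Option String) : Prop := out = extract_title_from_content_alt content
instance (content : String) (out : Option String) : Decidable (Spec_extract_title_from_content content out) := by unfold Spec_extract_title_from_content; infer_instance

-- ===== CLAIM (what is proved, stated in full; the proofs are below) =====
def Claim_equal_extract_title_from_content : Prop := ∀ (content : String), Dom_extract_title_from_content content → Spec_extract_title_from_content content (extract_title_from_content content)

-- ===== LEMMAS AND PROOFS =====

-- proof-side vocabulary: everything is phrased over the fixed list of lines L and Nat indices
def urlB (L : List String) (k : Nat) : Bool := PySem.Str.startswith (L.getD k "") "URL:"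

def passB (L : List String) (k : Nat) : Bool :=
  decide (PySem.Str.strip (L.getD k "") ≠ "" ∧ PySem.Str.startswith (L.getD k "") "=" ≠ true ∧
          PySem.Str.len (PySem.Str.strip (L.getD k "")) < 200 ∧
          PySem.Str.startswith (PySem.Str.strip (L.getD k "")) "Home" ≠ true)

def winB (L : List String) (k : Nat) : Bool :=
  (List.range k).any (fun i => urlB L i && decide (k ≤ i + 14))

def goodB (L : List String) (k : Nat) : Bool := passB L k && winB L k

-- first good index at or after k, among the next m indices
def firstGood (L : List String) (k : Nat) : Nat → Option Nat
  | 0 => none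
  | m + 1 => if goodB L k then some k else firstGood L (k + 1) m

-- index of the last 'URL:' line strictly before p
def lastU (L : List String) : Nat → Option Int
  | 0 => none
  | p + 1 => if urlB L p then some ((p : Nat) : Int) else lastU L p

lemma getD_append_len (P T : List String) (x d : String) : (P ++ x :: T).getD P.length d = x := by
  simp [List.getD_eq_getElem?_getD]

lemma winB_iff (L : List String) (k : Nat) :
    winB L k = true ↔ ∃ i : Nat, i < k ∧ urlB L i = true ∧ k ≤ i + 14 := by
  simp [winB, List.any_eq_true, List.mem_range]

lemma lastU_none (L : List String) : ∀ p, lastU L p = none → ∀ i, i < p → urlB L i = false := by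
  intro p
  induction p with
  | zero => intro _ i hi; omega
  | succ p ih =>
    intro h i hi
    rw [lastU] at h
    by_cases hu : urlB L p = true
    · simp [hu] at h
    · rcases Nat.lt_succ_iff_lt_or_eq.mp hi with h' | h'
      · exact ih (by simpa [hu] using h) i h'
      · subst h'; simpa using hu

lemma lastU_some (L : List String) : ∀ p u, lastU L p = some u →
    ∃ q : Nat, u = (q : Int) ∧ q < p ∧ urlB L q = true ∧ ∀ i, q < i → i < p → urlB L i = false := by
  intro p
  induction p with
  | zero => intro u h; simp [lastU] at h
  | succ p ih =>
    intro u h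
    rw [lastU] at h
    by_cases hu : urlB L p = true
    · refine ⟨p, by simpa [hu] using h.symm, by omega, hu, by omega⟩
    · obtain ⟨q, hq1, hq2, hq3, hq4⟩ := ih u (by simpa [hu] using h)
      refine ⟨q, hq1, by omega, hq3, ?_⟩
      intro i hqi hip
      rcases Nat.lt_succ_iff_lt_or_eq.mp hip with h' | h'
      · exact hq4 i hqi h'
      · subst h'; simpa using hu

lemma guard_eq_winB (L : List String) (k : Nat) :
    (match lastU L k with
     | some u => decide (1 ≤ (k : Int) - u ∧ (k : Int) - u ≤ 14)
     | none => false) = winB L k := by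
  cases h : lastU L k with
  | none =>
    have := lastU_none L k h
    simp only []
    symm
    rw [← Bool.not_eq_true, winB_iff]
    rintro ⟨i, hi, hurl, _⟩
    simp [this i hi] at hurl
  | some u =>
    obtain ⟨q, rfl, hqk, hurl, hmax⟩ := lastU_some L k u h
    simp only []
    by_cases hw : k ≤ q + 14
    · rw [(winB_iff L k).mpr ⟨q, hqk, hurl, hw⟩]
      simp; omega
    · have : winB L k = false := by
        rw [← Bool.not_eq_true, winB_iff]
        rintro ⟨i, hik, hiurl, hiw⟩
        by_cases hiq : i ≤ q
        · omega
        · simp [hmax i (by omega) hik] at hiurl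
      rw [this]
      simp; omega

lemma firstGood_eq_none (L : List String) : ∀ m s, (∀ k, s ≤ k → k < s + m → goodB L k = false) →
    firstGood L s m = none := by
  intro m
  induction m with
  | zero => intro s _; rfl
  | succ m ih =>
    intro s h
    rw [firstGood, h s (le_refl s) (by omega), if_neg (by simp)]
    exact ih (s + 1) fun k h1 h2 => h k (by omega) (by omega)

lemma firstGood_eq_some (L : List String) : ∀ m s k0, s ≤ k0 → k0 < s + m → goodB L k0 = true →
    (∀ k, s ≤ k → k < k0 → goodB L k = false) → firstGood L s m = some k0 := by
  intro m
  induction m with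
  | zero => intro s k0 h1 h2; omega
  | succ m ih =>
    intro s k0 h1 h2 hg hmin
    by_cases hs : s = k0
    · subst hs; rw [firstGood, if_pos hg]
    · rw [firstGood, if_neg (by simp [hmin s (le_refl s) (by omega)])]
      exact ih (s + 1) k0 (by omega) (by omega) hg fun k ha hb => hmin k (by omega) hb

-- B's scan computes the first good index
lemma bScan_eq (L : List String) : ∀ T P : List String, L = P ++ T →
    bScan (lastU L P.length) (PySem.List.enumerate T (P.length : Int)) =
      (firstGood L P.length T.length).map (fun k => PySem.Str.strip (L.getD k "")) := by
  intro T
  induction T with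
  | nil => intro P hL; simp [PySem.List.enumerate_nil, bScan, firstGood]
  | cons line T' ih =>
    intro P hL
    have hline : (P ++ line :: T').getD P.length "" = line := getD_append_len P T' line ""
    rw [← hL] at hline
    rw [PySem.List.enumerate_cons]; rw [bScan.eq_def]; simp only []; rw [← hline, guard_eq_winB]; simp only [List.length_cons]
    have hlast : (if PySem.Str.startswith (L.getD P.length "") "URL:" = true
        then some ((P.length : Nat) : Int) else lastU L P.length) = lastU L (P.length + 1) := by
      simp [lastU, urlB]
    cases hg : goodB L P.length with
    | true =>
      have hgw : (winB L P.length && passB L P.length) = true := by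
        unfold goodB at hg; rw [Bool.and_comm]; exact hg
      unfold passB at hgw
      rw [if_pos hgw,
        show firstGood L P.length (T'.length + 1)
          = if goodB L P.length then some P.length else firstGood L (P.length + 1) T'.length from rfl,
        if_pos hg]
      rfl
    | false =>
      have hgw : (winB L P.length && passB L P.length) = false := by
        unfold goodB at hg; rw [Bool.and_comm]; exact hg
      unfold passB at hgw
      rw [if_neg (by rw [hgw]; simp), hlast,
        show firstGood L P.length (T'.length + 1)
          = if goodB L P.length then some P.length else firstGood L (P.length + 1) T'.length from rfl,
        if_neg (by rw [hg]; simp)]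
      have h2 := ih (P ++ [line]) (by simpa using hL)
      simpa using h2

-- A's window scan: characterisation of its result
lemma aWindow_cons (L : List String) (j : Int) (rest : List Int) (hj : 0 ≤ j) :
    aWindow L (j :: rest) =
      if passB L j.toNat then some (PySem.Str.strip (L.getD j.toNat "")) else aWindow L rest := by
  have hget : PySem.List.pyGetD L j "" = L.getD j.toNat "" := by
    rw [PySem.List.pyGetD, PySem.List.pyGet?_of_nonneg L hj, List.getD_eq_getElem?_getD]
  rw [aWindow, hget]
  unfold passB
  by_cases hC : (PySem.Str.strip (L.getD j.toNat "") ≠ "" ∧ PySem.Str.startswith (L.getD j.toNat "") "=" ≠ true ∧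
          PySem.Str.len (PySem.Str.strip (L.getD j.toNat "")) < 200 ∧
          PySem.Str.startswith (PySem.Str.strip (L.getD j.toNat "")) "Home" ≠ true)
  · rw [if_pos ⟨hC.1, hC.2.1, hC.2.2.1⟩, if_pos ⟨hC.1, hC.2.2.2⟩, if_pos (by simpa using hC)]
  · by_cases h1 : (PySem.Str.strip (L.getD j.toNat "") ≠ "" ∧ PySem.Str.startswith (L.getD j.toNat "") "=" ≠ true ∧
          PySem.Str.len (PySem.Str.strip (L.getD j.toNat "")) < 200)
    · by_cases h4 : PySem.Str.startswith (PySem.Str.strip (L.getD j.toNat "")) "Home" ≠ true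
      · exact absurd ⟨h1.1, h1.2.1, h1.2.2, h4⟩ hC
      · rw [if_pos h1, if_neg (fun h => h4 h.2), if_neg (by simpa using hC)]
    · rw [if_neg h1, if_neg (by simpa using hC)]

lemma aWindow_none (L : List String) (b : Int) : ∀ m (a : Int), 0 ≤ a → (b - a).toNat = m →
    aWindow L (PySem.List.pyRange a b 1) = none →
    ∀ k : Nat, a ≤ (k : Int) → (k : Int) < b → passB L k = false := by
  intro m
  induction m with
  | zero =>
    intro a _ hm _ k hak hkb
    omega
  | succ m ih =>
    intro a ha hm hw k hak hkb
    rw [PySem.List.pyRange_one_cons (by omega), aWindow_cons L a _ ha] at hw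
    by_cases hp : passB L a.toNat = true
    · rw [if_pos hp] at hw; exact absurd hw (by simp)
    · rw [if_neg hp] at hw
      by_cases hka : (k : Int) = a
      · have : k = a.toNat := by omega
        subst this
        exact Bool.eq_false_iff.mpr hp
      · exact ih (a + 1) (by omega) (by omega) hw k (by omega) hkb

lemma aWindow_some (L : List String) (b : Int) : ∀ m (a : Int), 0 ≤ a → (b - a).toNat = m →
    ∀ t, aWindow L (PySem.List.pyRange a b 1) = some t →
    ∃ k : Nat, a ≤ (k : Int) ∧ (k : Int) < b ∧ passB L k = true ∧
      t = PySem.Str.strip (L.getD k "") ∧ ∀ k' : Nat, a ≤ (k' : Int) → k' < k → passB L k' = false := by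
  intro m
  induction m with
  | zero =>
    intro a _ hm t hw
    rw [PySem.List.pyRange_one_eq_nil (by omega)] at hw
    exact absurd hw (by simp [aWindow])
  | succ m ih =>
    intro a ha hm t hw
    rw [PySem.List.pyRange_one_cons (by omega), aWindow_cons L a _ ha] at hw
    by_cases hp : passB L a.toNat = true
    · rw [if_pos hp] at hw
      refine ⟨a.toNat, by omega, by omega, hp, by simpa using hw.symm, ?_⟩
      intro kx hakx hkx
      omega
    · rw [if_neg hp] at hw
      obtain ⟨k, hk1, hk2, hk3, hk4, hk5⟩ := ih (a + 1) (by omega) (by omega) t hw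
      refine ⟨k, by omega, hk2, hk3, hk4, ?_⟩
      intro kx hakx hkx
      by_cases hka : (kx : Int) = a
      · have : kx = a.toNat := by omega
        subst this
        exact Bool.eq_false_iff.mpr hp
      · exact hk5 kx (by omega) hkx

-- A's nested scan also computes the first good index
lemma aOuter_eq (L : List String) : ∀ T P : List String, L = P ++ T →
    (∀ k i : Nat, i < P.length → i < k → k ≤ i + 14 → k < L.length → urlB L i = true → passB L k = false) →
    aOuter L (PySem.List.enumerate T (P.length : Int)) =
      (firstGood L 0 L.length).map (fun k => PySem.Str.strip (L.getD k "")) := by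
  intro T
  induction T with
  | nil =>
    intro P hL H
    rw [PySem.List.enumerate_nil]
    rw [firstGood_eq_none L L.length 0 ?_]
    · rfl
    · intro k _ hk
      refine Bool.eq_false_iff.mpr ?_
      intro hgb
      simp only [goodB, Bool.and_eq_true] at hgb
      obtain ⟨hp, hwin⟩ := hgb
      obtain ⟨i, hik, hiurl, hi14⟩ := (winB_iff L k).mp hwin
      have hlen : P.length = L.length := by rw [hL]; simp
      have := H k i (by omega) hik hi14 (by omega) hiurl
      simp [this] at hp
  | cons line T2 ih =>
    intro P hL H
    have hline : L.getD P.length "" = line := by rw [hL]; exact getD_append_len P T2 line ""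
    rw [PySem.List.enumerate_cons]
    rw [aOuter.eq_def]
    simp only []
    rw [← hline]
    by_cases hu : PySem.Str.startswith (L.getD P.length "") "URL:" = true
    · rw [if_pos hu]
      cases hw : aWindow L (PySem.List.pyRange ((P.length : Int) + 1) (min ((P.length : Int) + 15) (L.length : Int)) 1) with
      | some t =>
        obtain ⟨k0, hk0a, hk0b, hp0, ht, hmin⟩ :=
          aWindow_some L _ _ ((P.length : Int) + 1) (by omega) rfl t hw
        have hk0b1 : (k0 : Int) < (P.length : Int) + 15 := lt_of_lt_of_le hk0b (min_le_left _ _)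
        have hk0b2 : (k0 : Int) < (L.length : Int) := lt_of_lt_of_le hk0b (min_le_right _ _)
        rw [firstGood_eq_some L L.length 0 k0 (by omega) (by omega) ?_ ?_]
        · simp [ht]
        · simp only [goodB, Bool.and_eq_true]
          exact ⟨hp0, (winB_iff L k0).mpr ⟨P.length, by omega, hu, by omega⟩⟩
        · intro k _ hk
          refine Bool.eq_false_iff.mpr ?_
          intro hgb
          simp only [goodB, Bool.and_eq_true] at hgb
          obtain ⟨hp, hwin⟩ := hgb
          obtain ⟨i, hik, hiurl, hi14⟩ := (winB_iff L k).mp hwin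
          by_cases hip : i < P.length
          · have := H k i hip hik hi14 (by omega) hiurl
            simp [this] at hp
          · have := hmin k (by omega) hk
            simp [this] at hp
      | none =>
        show aOuter L (PySem.List.enumerate T2 ((P.length : Int) + 1)) =
          Option.map (fun k => PySem.Str.strip (L.getD k "")) (firstGood L 0 L.length)
        rw [show ((P.length : Int) + 1) = (((P ++ [line]).length : Nat) : Int) by simp]
        apply ih (P ++ [line])
        · rw [hL]; simp
        · intro k i hi hik hi14 hkL hiurl
          rcases Nat.lt_succ_iff_lt_or_eq.mp (by simpa using hi) with hip | hip
          · exact H k i hip hik hi14 hkL hiurl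
          · subst hip
            exact aWindow_none L _ _ ((P.length : Int) + 1) (by omega) rfl hw k (by omega)
              (by simp only [lt_min_iff]; omega)
    · rw [if_neg hu]
      rw [show ((P.length : Int) + 1) = (((P ++ [line]).length : Nat) : Int) by simp]
      apply ih (P ++ [line])
      · rw [hL]; simp
      · intro k i hi hik hi14 hkL hiurl
        rcases Nat.lt_succ_iff_lt_or_eq.mp (by simpa using hi) with hip | hip
        · exact H k i hip hik hi14 hkL hiurl
        · subst hip
          rw [hline] at hu
          exact absurd (hline ▸ hiurl) hu

-- ===== VERDICT (by name: the statement is the Claim_ definition above) =====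
theorem extract_title_from_content_spec : Claim_equal_extract_title_from_content := by
  intro content _
  unfold Spec_extract_title_from_content extract_title_from_content extract_title_from_content_alt
  set L := (PySem.Str.split? content "\n").getD [] with hL
  have hA := aOuter_eq L L [] rfl (by intro k i hi; exact absurd hi (by simp))
  have hB := bScan_eq L L [] rfl
  simp only [List.length_nil, Nat.cast_zero] at hA hB
  simp only [lastU] at hB
  rw [hA, hB]
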